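-- pv_equiv track=rewrite | github.com/werdnum/family-assistant | src/family_assistant/services/backends/docker.py | _convert_memory_to_docker
-- ===== SOURCE A (Python) =====
-- def _convert_memory_to_docker(k8s_memory: str) -> str:
--     """Convert Kubernetes memory format to Docker format.
--
--     Args:
--         k8s_memory: Memory in Kubernetes format (e.g., "512Mi", "2Gi", "2G")
--
--     Returns:
--         Memory in Docker format (e.g., "512m", "2g")
--     """
--     # Kubernetes uses Mi/Gi/Ki/M/G/K, Docker uses m/g/k (lowercase)
--     # Order matters: check longer suffixes first
--     result = k8s_memory
--     for k8s_suffix, docker_suffix in [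
--         ("Mi", "m"),
--         ("Gi", "g"),
--         ("Ki", "k"),
--         ("M", "m"),
--         ("G", "g"),
--         ("K", "k"),
--     ]:
--         if result.endswith(k8s_suffix):
--             return result[: -len(k8s_suffix)] + docker_suffix
--     return result
-- ===== SOURCE B (Python) =====
-- def _convert_memory_to_docker(k8s_memory: str) -> str:
--     """Convert Kubernetes memory format to Docker format."""
--     units = {"M": "m", "G": "g", "K": "k"}
--     if k8s_memory.endswith("i"):
--         docker_unit = units.get(k8s_memory[-2:-1])
--         if docker_unit is not None:
--             return k8s_memory[:-2] + docker_unit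
--     else:
--         docker_unit = units.get(k8s_memory[-1:])
--         if docker_unit is not None:
--             return k8s_memory[:-1] + docker_unit
--     return k8s_memory
-- ===== Notes on version B (the rewrite author's own statement) =====
-- stated objective: simpler
-- what changed: Replaces the ordered six-pair suffix scan with a single right-to-left inspection of the string's final one or two characters and one lookup of the unit character in a three-entry map.
import Mathlib
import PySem

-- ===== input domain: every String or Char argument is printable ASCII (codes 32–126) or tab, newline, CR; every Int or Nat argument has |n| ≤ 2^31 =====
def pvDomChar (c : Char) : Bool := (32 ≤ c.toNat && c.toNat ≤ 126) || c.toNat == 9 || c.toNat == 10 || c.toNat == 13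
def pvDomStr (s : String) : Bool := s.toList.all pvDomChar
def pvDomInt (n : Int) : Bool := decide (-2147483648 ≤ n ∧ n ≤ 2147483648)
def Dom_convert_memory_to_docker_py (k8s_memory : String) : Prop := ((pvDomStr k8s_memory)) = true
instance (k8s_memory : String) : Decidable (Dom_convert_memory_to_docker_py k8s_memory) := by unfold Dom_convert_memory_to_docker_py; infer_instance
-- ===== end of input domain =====

-- B replaces A's ordered six-pair suffix scan by direct inspection of the trailing characters with a three-entry unit map (simpler).

-- ===== PORT A =====
-- the literal suffix-pair list from A, and A's for-loop with its early return
def pvSuffixPairs : List (List Char × List Char) :=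
  [(['M','i'], ['m']), (['G','i'], ['g']), (['K','i'], ['k']),
   (['M'], ['m']), (['G'], ['g']), (['K'], ['k'])]

def pvLoopA (result : List Char) : List (List Char × List Char) → List Char
  | [] => result
  | (k8s_suffix, docker_suffix) :: rest =>
      if PySem.Chars.endswith result k8s_suffix then
        PySem.Chars.slice result none (some (-(k8s_suffix.length : Int))) ++ docker_suffix
      else
        pvLoopA result rest

def convert_memory_to_docker_py (k8s_memory : String) : String :=
  String.ofList (pvLoopA k8s_memory.toList pvSuffixPairs)

-- ===== PORT B =====
-- B's unit map {'M': 'm', 'G': 'g', 'K': 'k'} (keys/values are 1-char slices of the input)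
def pvUnitMap : PySem.Dict (List Char) (List Char) :=
  PySem.Dict.mk [(['M'], ['m']), (['G'], ['g']), (['K'], ['k'])]

def convert_memory_to_docker_py_alt (k8s_memory : String) : String :=
  let cs := k8s_memory.toList
  if PySem.Chars.endswith cs ['i'] then
    match PySem.Dict.get? pvUnitMap (PySem.Chars.slice cs (some (-2)) (some (-1))) with
    | some docker_unit => String.ofList (PySem.Chars.slice cs none (some (-2)) ++ docker_unit)
    | none => String.ofList cs
  else
    match PySem.Dict.get? pvUnitMap (PySem.Chars.slice cs (some (-1)) none) with
    | some docker_unit => String.ofList (PySem.Chars.slice cs none (some (-1)) ++ docker_unit)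
    | none => String.ofList cs

-- ===== PRECONDITION & SPEC =====
def Spec_convert_memory_to_docker_py (k8s_memory : String) (out : String) : Prop := out = convert_memory_to_docker_py_alt k8s_memory
instance (k8s_memory : String) (out : String) : Decidable (Spec_convert_memory_to_docker_py k8s_memory out) := by unfold Spec_convert_memory_to_docker_py; infer_instance

-- ===== CLAIM (what is proved, stated in full; the proofs are below) =====
def Claim_equal_convert_memory_to_docker_py : Prop := ∀ (k8s_memory : String), Dom_convert_memory_to_docker_py k8s_memory → Spec_convert_memory_to_docker_py k8s_memory (convert_memory_to_docker_py k8s_memory)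

-- ===== LEMMAS AND PROOFS =====

-- B's branch structure, stated on the character list (proof helper)
def pvAltL (cs : List Char) : List Char :=
  if PySem.Chars.endswith cs ['i'] then
    match PySem.Dict.get? pvUnitMap (PySem.Chars.slice cs (some (-2)) (some (-1))) with
    | some docker_unit => PySem.Chars.slice cs none (some (-2)) ++ docker_unit
    | none => cs
  else
    match PySem.Dict.get? pvUnitMap (PySem.Chars.slice cs (some (-1)) none) with
    | some docker_unit => PySem.Chars.slice cs none (some (-1)) ++ docker_unit
    | none => cs

theorem pv_alt_eq (s : String) :
    convert_memory_to_docker_py_alt s = String.ofList (pvAltL s.toList) := by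
  unfold convert_memory_to_docker_py_alt pvAltL
  dsimp only
  split <;> split <;> rfl

-- endswith facts for the shapes the case split produces
theorem pv_endswith_two (l : List Char) (b c d e : Char) :
    PySem.Chars.endswith (l ++ [b, c]) [d, e] = (e == c && d == b) := by
  simp [PySem.Chars.endswith, List.isSuffixOf, List.isPrefixOf]

theorem pv_endswith_one (l : List Char) (b c d : Char) :
    PySem.Chars.endswith (l ++ [b, c]) [d] = (d == c) := by
  simp [PySem.Chars.endswith, List.isSuffixOf, List.isPrefixOf]

theorem pv_endswith_single (c d : Char) :
    PySem.Chars.endswith [c] [d] = (d == c) := by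
  simp [PySem.Chars.endswith, List.isSuffixOf, List.isPrefixOf]

theorem pv_endswith_short (c d e : Char) :
    PySem.Chars.endswith [c] [d, e] = false := by
  simp [PySem.Chars.endswith, List.isSuffixOf, List.isPrefixOf]

-- slice facts for lists ending in two characters
theorem pv_slice_m2_m1 (l : List Char) (b c : Char) :
    PySem.List.slice (l ++ [b, c]) (some (-2)) (some (-1)) = [b] := by
  have h1 : ((l.length : Int) + 2 + -1).toNat = l.length + 1 := by omega
  have h2 : ¬((l.length : Int) + 2 < 1) := by omega
  have h3 : ¬((l.length : Int) < 0) := by omega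
  simp [PySem.List.slice, PySem.List.clampIdx, h1, h2, h3]

theorem pv_slice_m1_none (l : List Char) (b c : Char) :
    PySem.List.slice (l ++ [b, c]) (some (-1)) none = [c] := by
  have h1 : ((l.length : Int) + 2 + -1).toNat = l.length + 1 := by omega
  have h2 : ¬((l.length : Int) + 2 < 1) := by omega
  have h4 : List.drop (l.length + 1) l = [] := List.drop_eq_nil_of_le (by omega)
  simp [PySem.List.slice, PySem.List.clampIdx, h1, h2, List.drop_append, h4]

theorem pv_slice_none_m1 (l : List Char) (b c : Char) :
    PySem.List.slice (l ++ [b, c]) none (some (-1)) = l ++ [b] := by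
  have h1 : ((l.length : Int) + 2 + -1).toNat = l.length + 1 := by omega
  have h2 : ¬((l.length : Int) + 2 < 1) := by omega
  simp [PySem.List.slice, PySem.List.clampIdx, h1, h2, List.take_append]

theorem pv_slice_none_m2 (l : List Char) (b c : Char) :
    PySem.List.slice (l ++ [b, c]) none (some (-2)) = l := by
  have h := PySem.List.slice_to_neg_ofNat (l ++ [b, c]) 2 (by omega)
  simp [h]

-- slice facts for the one-character list
theorem pv_slice1_m2_m1 (c : Char) : PySem.List.slice [c] (some (-2)) (some (-1)) = [] := by
  simp [PySem.List.slice, PySem.List.clampIdx]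

theorem pv_slice1_m1_none (c : Char) : PySem.List.slice [c] (some (-1)) none = [c] := by
  simp [PySem.List.slice, PySem.List.clampIdx]

theorem pv_slice1_none_m1 (c : Char) : PySem.List.slice [c] none (some (-1)) = [] := by
  simp [PySem.List.slice, PySem.List.clampIdx]

-- lookups in the three-entry unit map
theorem pv_get_nil : PySem.Dict.get? pvUnitMap ([] : List Char) = none := rfl

theorem pv_get_one (x : Char) :
    PySem.Dict.get? pvUnitMap [x] =
      if 'M' = x then some ['m'] else if 'G' = x then some ['g']
      else if 'K' = x then some ['k'] else none := by
  by_cases hM : ('M' : Char) = x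
  · subst hM; rfl
  by_cases hG : ('G' : Char) = x
  · subst hG; simp [pvUnitMap, PySem.Dict.get?_mk_cons, hM]
  by_cases hK : ('K' : Char) = x
  · subst hK; simp [pvUnitMap, PySem.Dict.get?_mk_cons, hM, hG]
  simp [pvUnitMap, hM, hG, hK, PySem.Dict.get?]

theorem pv_main (cs : List Char) : pvLoopA cs pvSuffixPairs = pvAltL cs := by
  induction cs using List.reverseRecOn with
  | nil => decide
  | append_singleton l c _ =>
    induction l using List.reverseRecOn with
    | nil =>
      simp only [List.nil_append]
      simp [pvLoopA, pvSuffixPairs, pvAltL, pv_endswith_single, pv_endswith_short,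
            pv_slice1_m2_m1, pv_slice1_m1_none, pv_slice1_none_m1,
            pv_get_one, pv_get_nil]
      split_ifs <;> (try subst_vars) <;> simp_all
    | append_singleton l' b _ =>
      simp only [List.append_assoc, List.singleton_append]
      simp [pvLoopA, pvSuffixPairs, pvAltL, pv_endswith_one, pv_endswith_two,
            pv_slice_m2_m1, pv_slice_m1_none, pv_slice_none_m1, pv_slice_none_m2,
            pv_get_one]
      split_ifs <;> (try subst_vars) <;> simp_all

-- ===== VERDICT (by name: the statement is the Claim_ definition above) =====
theorem convert_memory_to_docker_py_spec : Claim_equal_convert_memory_to_docker_py := by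
  intro s _
  unfold Spec_convert_memory_to_docker_py
  rw [pv_alt_eq]
  unfold convert_memory_to_docker_py
  rw [pv_main]
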